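-- pv_equiv track=rewrite | github.com/josestg/Steganografi-electron-Flask | server/app/machine/Vigenerecipher.py | unicode_table
-- ===== SOURCE A (Python) =====
-- def unicode_table(x=65,y=91):
-- 	n = y-x
-- 	table = list()
-- 	column = list()
-- 	for i in range(0,n):
-- 		for j in range(0,n):
-- 			column.append(chr((x+((i+j)%(y-x)))))
-- 		table.append(column)
-- 		column = []
-- 	return table
-- ===== SOURCE B (Python) =====
-- def unicode_table(x=65, y=91):
--     n = y - x
--     base = [chr(x + k) for k in range(n)]
--     return [base[i:] + base[:i] for i in range(n)]
-- ===== Notes on version B (the rewrite author's own statement) =====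
-- stated objective: simpler
-- what changed: B builds the alphabet once and forms each row as a cyclic rotation base[i:]+base[:i] by slicing, instead of recomputing chr((x+((i+j)%(y-x)))) per cell in a nested loop. Pre_ excludes inputs whose chr codes are invalid (A raises ValueError) or are lone surrogates, whose output strings are not representable in the port's String type.
-- outside the precondition, e.g. on unicode_table(-1, 2): A raises ValueError, B raises ValueError
import Mathlib
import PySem

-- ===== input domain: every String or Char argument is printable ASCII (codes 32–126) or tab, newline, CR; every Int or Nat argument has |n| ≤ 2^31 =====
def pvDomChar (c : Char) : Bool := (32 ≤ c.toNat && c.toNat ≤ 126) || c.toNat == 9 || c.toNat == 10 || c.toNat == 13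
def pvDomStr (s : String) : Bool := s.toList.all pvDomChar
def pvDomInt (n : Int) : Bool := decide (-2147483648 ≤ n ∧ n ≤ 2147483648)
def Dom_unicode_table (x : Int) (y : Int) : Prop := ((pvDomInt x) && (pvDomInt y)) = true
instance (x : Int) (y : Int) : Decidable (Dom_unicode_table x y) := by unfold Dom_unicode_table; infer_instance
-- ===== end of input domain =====

-- B builds the alphabet once and forms each row as a rotation base[i:]+base[:i]; A recomputes chr per cell in a nested loop (objective: simpler).

-- Python's chr(n); exact for 0 ≤ n < 0xD800 or 0xE000 ≤ n < 0x110000 (the codes Pre_ admits).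
def pyChr (n : Int) : String := String.ofList [Char.ofNat n.toNat]

-- ===== PORT A =====
def unicode_table (x : Int) (y : Int) : List (List String) :=
  let n := y - x
  let st :=
    (PySem.List.pyRange 0 n 1).foldl
      (fun (st : List (List String) × List String) i =>
        let column :=
          (PySem.List.pyRange 0 n 1).foldl
            (fun col j => col ++ [pyChr (x + PySem.Int.mod (i + j) (y - x))]) st.2
        (st.1 ++ [column], []))
      ([], [])
  st.1

-- ===== PORT B =====
def unicode_table_alt (x : Int) (y : Int) : List (List String) :=
  let n := y - x
  let base := (PySem.List.pyRange 0 n 1).map (fun k => pyChr (x + k))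
  (PySem.List.pyRange 0 n 1).map
    (fun i => PySem.List.slice base (some i) none ++ PySem.List.slice base none (some i))

-- ===== PRECONDITION & SPEC =====
-- Pre_ excludes inputs where Python's chr raises ValueError (a code below 0 or ≥ 0x110000),
-- and inputs whose table would contain lone-surrogate characters (codes 0xD800..0xDFFF):
-- A returns such strings but they are not representable as Lean Strings.
def Pre_unicode_table (x : Int) (y : Int) : Prop :=
  y ≤ x ∨ (0 ≤ x ∧ (y ≤ 55296 ∨ (57344 ≤ x ∧ y ≤ 1114112)))
instance (x : Int) (y : Int) : Decidable (Pre_unicode_table x y) := by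
  unfold Pre_unicode_table; infer_instance
def pvWitness_unicode_table : Int × Int := (65, 91)

def Spec_unicode_table (x : Int) (y : Int) (out : List (List String)) : Prop :=
  out = unicode_table_alt x y
instance (x : Int) (y : Int) (out : List (List String)) : Decidable (Spec_unicode_table x y out) := by
  unfold Spec_unicode_table; infer_instance

-- ===== CLAIM (what is proved, stated in full; the proofs are below) =====
def Claim_equal_unicode_table : Prop :=
  ∀ (x : Int) (y : Int), Dom_unicode_table x y → Pre_unicode_table x y →
    Spec_unicode_table x y (unicode_table x y)

-- ===== LEMMAS AND PROOFS =====

-- inner loop of A: appending one element per step is map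
theorem foldl_append_map {α β : Type} (l : List α) (f : α → β) (init : List β) :
    l.foldl (fun acc j => acc ++ [f j]) init = init ++ l.map f := by
  induction l generalizing init with
  | nil => simp
  | cons a l ih => simp [List.foldl, ih]

-- outer loop of A: the column accumulator is [] at the start of every iteration
theorem foldl_rows {α : Type} (l : List Int) (g : Int → List Int) (f : Int → Int → α)
    (t : List (List α)) :
    l.foldl
      (fun (st : List (List α) × List α) i =>
        (st.1 ++ [(g i).foldl (fun col j => col ++ [f i j]) st.2], []))
      (t, [])
    = (t ++ l.map (fun i => (g i).map (f i)), []) := by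
  induction l generalizing t with
  | nil => simp
  | cons a l ih =>
      simp only [List.foldl_cons]
      rw [ih, foldl_append_map]
      simp

-- one row of A is the a-th left rotation of the base alphabet
theorem row_eq (x : Int) (m a : Nat) (ha : a < m) :
    (List.range m).map (fun (j : Nat) => pyChr (x + PySem.Int.mod ((a : Int) + (j : Int)) (m : Int)))
      = ((List.range m).map (fun (k : Nat) => pyChr (x + (k : Int)))).drop a
        ++ ((List.range m).map (fun (k : Nat) => pyChr (x + (k : Int)))).take a := by
  apply List.ext_getElem
  · simp; omega
  · intro i h1 h2
    simp only [List.length_map, List.length_range, List.length_append,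
      List.length_drop, List.length_take] at h1 h2
    have hm : (0 : Int) < (m : Int) := by exact_mod_cast Nat.pos_of_ne_zero (by omega)
    rw [List.getElem_map, List.getElem_range, PySem.Int.mod_eq_emod_of_pos hm,
      List.getElem_append]
    split_ifs with h
    · simp only [List.length_drop, List.length_map, List.length_range] at h
      rw [List.getElem_drop, List.getElem_map, List.getElem_range]
      have he : ((a : Int) + (i : Int)) % (m : Int) = ((a + i : Nat) : Int) := by
        rw [Int.emod_eq_of_lt (by positivity) (by exact_mod_cast (by omega : a + i < m))]
        push_cast; ring
      rw [he]
    · simp only [List.length_drop, List.length_map, List.length_range] at h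
      rw [List.getElem_take, List.getElem_map, List.getElem_range]
      have he : ((a : Int) + (i : Int)) % (m : Int) = ((i - (m - a) : Nat) : Int) := by
        have hsplit : (a : Int) + (i : Int) = ((i - (m - a) : Nat) : Int) + (m : Int) * 1 := by
          push_cast [Nat.cast_sub (by omega : m - a ≤ i), Nat.cast_sub ha.le]; ring
        rw [hsplit, Int.add_mul_emod_self_left,
          Int.emod_eq_of_lt (by positivity) (by exact_mod_cast (by omega : i - (m - a) < m))]
      rw [he]
      congr 2
      simp

-- ===== VERDICT (by name: the statement is the Claim_ definition above) =====
theorem unicode_table_spec : Claim_equal_unicode_table := by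
  intro x y _ _
  unfold Spec_unicode_table
  dsimp only [unicode_table, unicode_table_alt]
  by_cases hn : y - x ≤ 0
  · simp [PySem.List.pyRange_one_eq_nil hn]
  · replace hn : 0 < y - x := by omega
    set m : Nat := (y - x).toNat with hm
    have hmn : (y - x) = (m : Nat) := by omega
    rw [foldl_rows]
    rw [hmn, PySem.List.pyRange_one]
    simp only [sub_zero, Int.toNat_natCast, zero_add, List.map_map, Function.comp_def]
    apply List.map_congr_left
    intro a hamem
    have ha : a < m := List.mem_range.mp hamem
    rw [PySem.List.slice_from_natCast, PySem.List.slice_to_natCast]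
    exact row_eq x m a ha
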